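-- pv_equiv track=rewrite | github.com/agners/aoc24 | day5/day5-part2.py | validate_page
-- ===== SOURCE A (Python) =====
-- def validate_page(pages: list[int], page_order: dict[int, list[int]]) -> bool:
--     """Validate page order"""
--
--
--     for i in range(len(pages) - 1):
--         if pages[i] not in page_order:
--             continue
--         for v in page_order[pages[i]]:
--             for j in range(i, len(pages)):
--                 if pages[j] == v:
--                     return False
--     return True
-- ===== SOURCE B (Python) =====
-- def validate_page(pages: list[int], page_order: dict[int, list[int]]) -> bool:
--     """Validate page order"""
--     forbidden = set()
--     last = len(pages) - 1
--     for j, p in enumerate(pages):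
--         if j < last:
--             forbidden.update(page_order.get(p, ()))
--         if p in forbidden:
--             return False
--     return True
-- ===== Notes on version B (the rewrite author's own statement) =====
-- stated objective: alternative
-- what changed: A's triple-nested loop (outer index, loop over required values, rescan of the suffix per value) is replaced by one forward pass that accumulates every forbidden value seen so far into a growing set and tests each page against it once, so no suffix is ever rescanned.
import Mathlib
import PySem

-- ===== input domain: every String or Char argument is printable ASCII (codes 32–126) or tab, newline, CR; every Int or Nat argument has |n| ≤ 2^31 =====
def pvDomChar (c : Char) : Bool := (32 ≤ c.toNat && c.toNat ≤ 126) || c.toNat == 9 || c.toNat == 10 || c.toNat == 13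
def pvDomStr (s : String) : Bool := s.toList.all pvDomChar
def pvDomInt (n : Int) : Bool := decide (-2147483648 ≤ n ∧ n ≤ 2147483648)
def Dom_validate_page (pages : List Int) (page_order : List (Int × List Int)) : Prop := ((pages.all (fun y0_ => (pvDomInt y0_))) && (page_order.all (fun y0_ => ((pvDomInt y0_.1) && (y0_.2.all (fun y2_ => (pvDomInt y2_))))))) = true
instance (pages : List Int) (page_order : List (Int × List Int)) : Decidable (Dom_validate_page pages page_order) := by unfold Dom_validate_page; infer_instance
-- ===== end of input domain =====

-- ===== PORT A =====
-- A: triple-nested loop — outer index, loop over required values, rescan of the suffix per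
-- value. B: one forward pass accumulating every forbidden value seen so far into a growing
-- set, testing each page against it once; no suffix is rescanned (objective: alternative).
def validate_page (pages : List Int) (page_order : List (Int × List Int)) : Bool :=
  -- for i in range(len(pages)-1): … early 'return False' becomes 'any'
  !((PySem.List.pyRange 0 (PySem.List.len pages - 1) 1).any (fun i =>
      match PySem.Dict.get? (PySem.Dict.mk page_order) (PySem.List.pyGetD pages i 0) with
      | none => false        -- 'if pages[i] not in page_order: continue'
      | some vs =>
        vs.any (fun v =>
          (PySem.List.pyRange i (PySem.List.len pages) 1).any (fun j =>
            PySem.List.pyGetD pages j 0 == v))))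

-- ===== PORT B =====
-- the loop body of Source B: state = the accumulated 'forbidden' set; early return False = false
def vpGo (d : PySem.Dict Int (List Int)) (last : Int) :
    List (Int × Int) → PySem.Set Int → Bool
  | [], _ => true
  | (j, p) :: rest, forbidden =>
    -- if j < last: forbidden.update(page_order.get(p, ()))
    let forbidden' :=
      if j < last then PySem.Set.update forbidden ((PySem.Dict.get? d p).getD []) else forbidden
    -- if p in forbidden: return False
    if PySem.Set.contains forbidden' p then false else vpGo d last rest forbidden'

def validate_page_alt (pages : List Int) (page_order : List (Int × List Int)) : Bool :=
  vpGo (PySem.Dict.mk page_order) (PySem.List.len pages - 1)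
    (PySem.List.enumerate pages 0) PySem.Set.empty

-- ===== PRECONDITION & SPEC =====
def Spec_validate_page (pages : List Int) (page_order : List (Int × List Int)) (out : Bool) : Prop := out = validate_page_alt pages page_order
instance (pages : List Int) (page_order : List (Int × List Int)) (out : Bool) : Decidable (Spec_validate_page pages page_order out) := by unfold Spec_validate_page; infer_instance

-- ===== CLAIM (what is proved, stated in full; the proofs are below) =====
def Claim_equal_validate_page : Prop := ∀ (pages : List Int) (page_order : List (Int × List Int)), Dom_validate_page pages page_order → Spec_validate_page pages page_order (validate_page pages page_order)

-- ===== LEMMAS AND PROOFS =====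

-- rule values of page x (empty when x is not a key)
def vpRules (d : List (Int × List Int)) (x : Int) : List Int :=
  (PySem.Dict.get? (PySem.Dict.mk d) x).getD []

-- the common violation predicate: an earlier (or same) position m, m not the final index,
-- whose rule list contains the page at position j
def vpBad (d : List (Int × List Int)) (pages : List Int) : Prop :=
  ∃ m j : Nat, ∃ _hm : m + 1 < pages.length, ∃ hj : j < pages.length,
    m ≤ j ∧ pages[j] ∈ vpRules d (pages[m]'(by omega))

-- ---------- A's characterisation ----------

theorem validate_page_false_iff (pages : List Int) (d : List (Int × List Int)) :
    validate_page pages d = false ↔ vpBad d pages := by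
  unfold validate_page
  rw [Bool.not_eq_false', List.any_eq_true]
  constructor
  · rintro ⟨i, hi, hbody⟩
    rw [PySem.List.mem_pyRange_one] at hi
    obtain ⟨hi0, hilt⟩ := hi
    obtain ⟨m, rfl⟩ : ∃ m : Nat, (m : Int) = i := ⟨i.toNat, Int.toNat_of_nonneg hi0⟩
    have hilt' : (m : Int) < (pages.length : Int) - 1 := by
      simpa [PySem.List.len] using hilt
    have hm : m + 1 < pages.length := by omega
    rw [PySem.List.pyGetD_natCast] at hbody
    cases hg : PySem.Dict.get? (PySem.Dict.mk d) (pages.getD m 0) with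
    | none => rw [hg] at hbody; simp at hbody
    | some vs =>
      rw [hg] at hbody
      simp only [List.any_eq_true] at hbody
      obtain ⟨v, hv, j, hj, hjeq⟩ := hbody
      rw [PySem.List.mem_pyRange_one] at hj
      obtain ⟨j', rfl⟩ : ∃ j' : Nat, (j' : Int) = j := ⟨j.toNat, Int.toNat_of_nonneg (by omega)⟩
      have hjlt : (j' : Int) < (pages.length : Int) := by
        simpa [PySem.List.len] using hj.2
      have hj' : j' < pages.length := by omega
      have hmj : m ≤ j' := by have := hj.1; omega
      refine ⟨m, j', hm, hj', hmj, ?_⟩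
      rw [PySem.List.pyGetD_natCast] at hjeq
      have hjval : pages.getD j' 0 = v := by exact_mod_cast of_decide_eq_true hjeq
      have hge : pages[j'] = v := by
        rw [← hjval]; simp [List.getD_eq_getElem?_getD, hj']
      rw [hge]
      unfold vpRules
      rw [show pages[m]'(by omega) = pages.getD m 0 by
        simp [List.getD_eq_getElem?_getD, show m < pages.length by omega]]
      rw [hg]; exact hv
  · rintro ⟨m, j, hm, hj, hmj, hmem⟩
    refine ⟨(m : Int), ?_, ?_⟩
    · rw [PySem.List.mem_pyRange_one]
      refine ⟨by positivity, ?_⟩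
      have : (m : Int) < (pages.length : Int) - 1 := by omega
      simpa [PySem.List.len] using this
    · rw [PySem.List.pyGetD_natCast]
      have hgd : pages.getD m 0 = pages[m]'(by omega) := by
        simp [List.getD_eq_getElem?_getD, show m < pages.length by omega]
      rw [hgd]
      unfold vpRules at hmem
      cases hg : PySem.Dict.get? (PySem.Dict.mk d) (pages[m]'(by omega)) with
      | none => rw [hg] at hmem; simp at hmem
      | some vs =>
        rw [hg] at hmem
        simp only [Option.getD_some] at hmem
        simp only [List.any_eq_true]
        refine ⟨pages[j], hmem, (j : Int), ?_, ?_⟩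
        · rw [PySem.List.mem_pyRange_one]
          refine ⟨by exact_mod_cast hmj, ?_⟩
          have : (j : Int) < (pages.length : Int) := by omega
          simpa [PySem.List.len] using this
        · rw [PySem.List.pyGetD_natCast]
          simp [List.getD_eq_getElem?_getD, hj]

-- ---------- B's characterisation ----------

-- loop invariant of Source B's pass: vpGo on the enumerated suffix is false iff some later page
-- is in the carried set F or in the rules of some not-final position at or before it
theorem vpGo_false_iff (d : List (Int × List Int)) (last : Int) (l : List (Int × Int))
    (F : PySem.Set Int) :
    vpGo (PySem.Dict.mk d) last l F = false ↔
      ∃ k : Nat, ∃ hk : k < l.length,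
        (l[k]).2 ∈ F ∨ ∃ m : Nat, ∃ _hm : m ≤ k, (l[m]'(by omega)).1 < last ∧
          (l[k]).2 ∈ vpRules d (l[m]'(by omega)).2 := by
  induction l generalizing F with
  | nil => simp [vpGo]
  | cons hd tl ih =>
    obtain ⟨j, p⟩ := hd
    simp only [vpGo]
    set F' := if j < last then PySem.Set.update F ((PySem.Dict.get? (PySem.Dict.mk d) p).getD []) else F with hF'
    have hmemF' : ∀ x : Int, x ∈ F' ↔ x ∈ F ∨ (j < last ∧ x ∈ vpRules d p) := by
      intro x
      rw [hF']
      split_ifs with hjl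
      · rw [PySem.Set.mem_update]; unfold vpRules; tauto
      · tauto
    by_cases hc : PySem.Set.contains F' p = true
    · simp only [hc, if_true, true_iff]
      refine ⟨0, by simp, ?_⟩
      rw [PySem.Set.contains_iff] at hc
      rcases (hmemF' p).1 hc with h | ⟨h1, h2⟩
      · exact Or.inl h
      · exact Or.inr ⟨0, le_refl _, h1, h2⟩
    · simp only [hc, if_false, Bool.false_eq_true]
      rw [ih F']
      rw [PySem.Set.contains_iff] at hc
      constructor
      · rintro ⟨k, hk, h⟩
        refine ⟨k + 1, by simpa using Nat.succ_lt_succ hk, ?_⟩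
        simp only [List.getElem_cons_succ]
        rcases h with h | ⟨m, hm1, hm2, hm3⟩
        · rcases (hmemF' _).1 h with h' | ⟨h1, h2⟩
          · exact Or.inl h'
          · exact Or.inr ⟨0, Nat.zero_le _, h1, h2⟩
        · exact Or.inr ⟨m + 1, Nat.succ_le_succ hm1, by simpa using hm2, by simpa using hm3⟩
      · rintro ⟨k, hk, h⟩
        cases k with
        | zero =>
          exfalso
          apply hc
          simp only [List.getElem_cons_zero] at h
          rcases h with h | ⟨m, hm1, hm2, hm3⟩
          · exact (hmemF' p).2 (Or.inl h)
          · obtain rfl : m = 0 := Nat.le_zero.mp hm1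
            simp only [List.getElem_cons_zero] at hm2 hm3
            exact (hmemF' p).2 (Or.inr ⟨hm2, hm3⟩)
        | succ k' =>
          have hk' : k' < tl.length := by
            simp only [List.length_cons] at hk; omega
          refine ⟨k', hk', ?_⟩
          simp only [List.getElem_cons_succ] at h
          rcases h with h | ⟨m, hm1, hm2, hm3⟩
          · exact Or.inl ((hmemF' _).2 (Or.inl h))
          · cases m with
            | zero =>
              simp only [List.getElem_cons_zero] at hm2 hm3
              exact Or.inl ((hmemF' _).2 (Or.inr ⟨hm2, hm3⟩))
            | succ m' =>
              simp only [List.getElem_cons_succ] at hm2 hm3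
              exact Or.inr ⟨m', by omega, hm2, hm3⟩

theorem validate_page_alt_false_iff (pages : List Int) (d : List (Int × List Int)) :
    validate_page_alt pages d = false ↔ vpBad d pages := by
  unfold validate_page_alt
  rw [vpGo_false_iff]
  constructor
  · rintro ⟨k, hk, h⟩
    have hk' : k < pages.length := by
      simpa [PySem.List.length_enumerate] using hk
    rcases h with h | ⟨m, hm1, hm2, hm3⟩
    · simp [PySem.Set.empty] at h
    · rw [PySem.List.getElem_enumerate] at hm2 hm3
      rw [PySem.List.getElem_enumerate] at hm3
      simp only [zero_add] at hm2 hm3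
      have hm2' : (m : Int) < (pages.length : Int) - 1 := by
        simpa [PySem.List.len] using hm2
      have hmlt : m + 1 < pages.length := by omega
      exact ⟨m, k, hmlt, hk', hm1, hm3⟩
  · rintro ⟨m, j, hm, hj, hmj, hmem⟩
    refine ⟨j, by simpa [PySem.List.length_enumerate] using hj,
      Or.inr ⟨m, hmj, ?_, ?_⟩⟩
    · rw [PySem.List.getElem_enumerate]
      simp only [zero_add]
      have : (m : Int) < (pages.length : Int) - 1 := by omega
      simpa [PySem.List.len] using this
    · rw [PySem.List.getElem_enumerate, PySem.List.getElem_enumerate]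
      simpa using hmem

theorem vp_main (pages : List Int) (d : List (Int × List Int)) :
    validate_page pages d = validate_page_alt pages d := by
  by_cases h : vpBad d pages
  · rw [(validate_page_false_iff pages d).2 h, (validate_page_alt_false_iff pages d).2 h]
  · have hA := (validate_page_false_iff pages d).not.2 h
    have hB := (validate_page_alt_false_iff pages d).not.2 h
    rw [Bool.not_eq_false] at hA hB
    rw [hA, hB]

-- ===== VERDICT (by name: the statement is the Claim_ definition above) =====
theorem validate_page_spec : Claim_equal_validate_page := by
  intro pages page_order _
  unfold Spec_validate_page
  exact vp_main pages page_order
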